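-- pv_equiv track=rewrite | github.com/bitnot/hackerrank-solutions | master/algorithms/strings/alternating-characters/solution.py | number_deletions
-- ===== SOURCE A (Python) =====
-- def number_deletions(ab):
--     l = len(ab)
--     if l<=1:
--         return 0
--     number_switches = 0
--     for i in range(1,l):
--         if ab[i] != ab[i-1]:
--             number_switches += 1
--     return l - number_switches - 1
-- ===== SOURCE B (Python) =====
-- def number_deletions(ab):
--     n = len(ab)
--     total = 0
--     i = 0
--     while i < n:
--         j = i + 1
--         while j < n and ab[j] == ab[i]:
--             j += 1
--         total += (j - i) - 1
--         i = j
--     return total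
-- ===== Notes on version B (the rewrite author's own statement) =====
-- stated objective: alternative
-- what changed: B scans the string as maximal runs of equal characters (outer loop per run, inner loop finds the run end) and sums run_length-1, instead of A's single indexed pass counting switches and computing len - switches - 1.
import Mathlib
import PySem

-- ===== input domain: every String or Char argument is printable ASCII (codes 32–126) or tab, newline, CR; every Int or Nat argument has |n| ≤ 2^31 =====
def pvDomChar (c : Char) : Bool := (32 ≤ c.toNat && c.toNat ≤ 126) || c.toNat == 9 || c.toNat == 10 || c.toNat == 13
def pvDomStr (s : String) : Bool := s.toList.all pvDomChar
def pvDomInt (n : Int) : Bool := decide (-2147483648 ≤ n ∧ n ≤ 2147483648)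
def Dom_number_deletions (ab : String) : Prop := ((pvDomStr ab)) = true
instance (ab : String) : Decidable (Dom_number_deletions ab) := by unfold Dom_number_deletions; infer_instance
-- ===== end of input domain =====

-- B differs from A by decomposition: it loops over maximal runs of equal characters and
-- sums (run length - 1), instead of counting character switches in one indexed pass.

-- ===== PORT A =====
-- literal transliteration of A: count i in range(1, l) with ab[i] != ab[i-1], return l - switches - 1.
-- (ab[i] is PySem.List.pyGet? on the char list; both indices are in range, so comparing the Options
-- is exactly Python's char comparison)
def number_deletions (ab : String) : Int :=
  let s := ab.toList
  let l : Int := PySem.Str.len ab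
  if l ≤ 1 then 0
  else
    let number_switches : Int :=
      (PySem.List.pyRange 1 l 1).foldl
        (fun acc i => if PySem.List.pyGet? s i ≠ PySem.List.pyGet? s (i - 1) then acc + 1 else acc) 0
    l - number_switches - 1

-- ===== PORT B =====
-- inner while loop of Source B: advance j while j < n and s[j] == c
def runEndB (s : List Char) (c : Char) (j : Nat) : Nat :=
  if h : j < s.length then
    if s[j] = c then runEndB s c (j + 1) else j
  else j
termination_by s.length - j

theorem le_runEndB (s : List Char) (c : Char) (j : Nat) : j ≤ runEndB s c j := by
  fun_induction runEndB with
  | case1 j h heq ih => omega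
  | case2 j h heq => omega
  | case3 j h => omega

-- outer while loop of Source B: per run starting at i, add (j - i) - 1 and jump to j
def sumRunsB (s : List Char) (i : Nat) : Int :=
  if h : i < s.length then
    let j := runEndB s s[i] (i + 1)
    ((j : Int) - (i : Int) - 1) + sumRunsB s j
  else 0
termination_by s.length - i
decreasing_by
  have := le_runEndB s s[i] (i + 1)
  omega

def number_deletions_alt (ab : String) : Int := sumRunsB ab.toList 0

-- ===== PRECONDITION & SPEC =====
def Spec_number_deletions (ab : String) (out : Int) : Prop := out = number_deletions_alt ab
instance (ab : String) (out : Int) : Decidable (Spec_number_deletions ab out) := by unfold Spec_number_deletions; infer_instance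

-- ===== CLAIM (what is proved, stated in full; the proofs are below) =====
def Claim_equal_number_deletions : Prop := ∀ (ab : String), Dom_number_deletions ab → Spec_number_deletions ab (number_deletions ab)

-- ===== LEMMAS AND PROOFS =====

-- canonical switch count: number of adjacent unequal pairs
def sw : List Char → Int
  | a :: b :: t => (if a ≠ b then 1 else 0) + sw (b :: t)
  | _ => 0

-- the common value of both programs: 0 on [], length - 1 - switches otherwise
def swd (v : List Char) : Int := if v = [] then 0 else (v.length : Int) - 1 - sw v

theorem runEndB_eq (s : List Char) (c : Char) (j : Nat) :
    runEndB s c j = j + ((s.drop j).takeWhile (· == c)).length := by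
  fun_induction runEndB with
  | case1 j h heq ih =>
    rw [ih, List.drop_eq_getElem_cons h, List.takeWhile_cons]
    simp [heq]
    omega
  | case2 j h heq =>
    rw [List.drop_eq_getElem_cons h, List.takeWhile_cons]
    simp [heq]
  | case3 j h =>
    rw [List.drop_eq_nil_of_le (by omega)]
    simp

-- dropping past the initial run is dropWhile (no such lemma in Mathlib/Batteries)
theorem drop_takeWhile_length (p : Char → Bool) (l : List Char) :
    l.drop (l.takeWhile p).length = l.dropWhile p := by
  induction l with
  | nil => simp
  | cons x xs ih =>
    by_cases h : p x
    · simp [h, ih]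
    · simp [h]

theorem run_split_swd (u : List Char) : ∀ c : Char,
    ((u.takeWhile (· == c)).length : Int) + swd (u.dropWhile (· == c))
      = (u.length : Int) - sw (c :: u) := by
  induction u with
  | nil => intro c; simp [swd, sw]
  | cons b u' ih =>
    intro c
    by_cases hbc : b = c
    · subst hbc
      rw [List.takeWhile_cons, List.dropWhile_cons]
      simp only [BEq.rfl, if_true]
      have hsw : sw (b :: b :: u') = sw (b :: u') := by simp [sw]
      have hih := ih b
      simp only [List.length_cons, hsw]
      push_cast at hih ⊢
      linarith
    · have hne : (b == c) = false := by simp [hbc]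
      rw [List.takeWhile_cons, List.dropWhile_cons]
      simp only [hne, if_false, Bool.false_eq_true]
      have hsw : sw (c :: b :: u') = 1 + sw (b :: u') := by
        have : c ≠ b := fun h => hbc h.symm
        simp [sw, this]
      have hswd : swd (b :: u') = ((b :: u').length : Int) - 1 - sw (b :: u') := by
        rw [swd, if_neg (List.cons_ne_nil b u')]
      rw [hswd, hsw]
      simp only [List.length_cons, List.length_nil]
      push_cast
      ring

theorem sumRunsB_eq (s : List Char) (i : Nat) : sumRunsB s i = swd (s.drop i) := by
  fun_induction sumRunsB with
  | case1 i h j ih =>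
    have hj : j = (i + 1) + ((s.drop (i + 1)).takeWhile (· == s[i])).length :=
      runEndB_eq s s[i] (i + 1)
    rw [ih]
    have hdrop : s.drop j = (s.drop (i + 1)).dropWhile (· == s[i]) := by
      rw [hj, ← List.drop_drop]
      exact drop_takeWhile_length _ (s.drop (i+1))
    rw [hdrop]
    have hrun := run_split_swd (s.drop (i + 1)) s[i]
    have hcons : s.drop i = s[i] :: s.drop (i + 1) := List.drop_eq_getElem_cons h
    have hswd : swd (s.drop i) = ((s.drop i).length : Int) - 1 - sw (s.drop i) := by
      rw [swd, if_neg (by rw [hcons]; exact List.cons_ne_nil _ _)]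
    rw [hswd, hcons]
    have hlen : (s.drop (i+1)).length = s.length - (i+1) := List.length_drop
    simp only [List.length_cons] at *
    omega
  | case2 i h =>
    rw [List.drop_eq_nil_of_le (by omega)]
    simp [swd]

-- A's indexed fold over range(1, l) computes the switch count
theorem foldA_eq_sw (t : List Char) : ∀ (a : Char) (acc : Int),
    (List.range t.length).foldl
      (fun (acc : Int) (k : Nat) =>
        if PySem.List.pyGet? (a :: t) (1 + (k : Int)) ≠ PySem.List.pyGet? (a :: t) (1 + (k : Int) - 1)
        then acc + 1 else acc) acc
    = acc + sw (a :: t) := by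
  induction t with
  | nil => intro a acc; simp [sw]
  | cons b t' ih =>
    intro a acc
    simp only [List.length_cons]
    rw [List.range_succ_eq_map, List.foldl_cons]
    simp only [List.foldl_map, Nat.succ_eq_add_one]
    have h1 : PySem.List.pyGet? (a :: b :: t') (1 + ((0 : Nat) : Int)) = some b := by
      have he : (1 + ((0 : Nat) : Int)) = ((0 : Nat) : Int) + 1 := by simp
      rw [he, PySem.List.pyGet?_cons_succ, PySem.List.pyGet?_natCast]
      simp
    have h0 : PySem.List.pyGet? (a :: b :: t') (1 + ((0 : Nat) : Int) - 1) = some a := by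
      have he : (1 + ((0 : Nat) : Int) - 1) = ((0 : Nat) : Int) := by simp
      rw [he, PySem.List.pyGet?_natCast]
      simp
    rw [h1, h0]
    have hstep : ∀ (acc : Int), ∀ k ∈ List.range t'.length,
        (if PySem.List.pyGet? (a :: b :: t') (1 + ((k + 1 : Nat) : Int)) ≠ PySem.List.pyGet? (a :: b :: t') (1 + ((k + 1 : Nat) : Int) - 1) then acc + 1 else acc)
        = (if PySem.List.pyGet? (b :: t') (1 + (k : Int)) ≠ PySem.List.pyGet? (b :: t') (1 + (k : Int) - 1) then acc + 1 else acc) := by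
      intro acc k _
      have e1 : PySem.List.pyGet? (a :: b :: t') (1 + ((k + 1 : Nat) : Int)) = PySem.List.pyGet? (b :: t') (1 + (k : Int)) := by
        have h3 : (1 + ((k + 1 : Nat) : Int)) = ((1 + k : Nat) : Int) + 1 := by push_cast; ring
        rw [h3, PySem.List.pyGet?_cons_succ]
        norm_num
      have e2 : PySem.List.pyGet? (a :: b :: t') (1 + ((k + 1 : Nat) : Int) - 1) = PySem.List.pyGet? (b :: t') (1 + (k : Int) - 1) := by
        have h3 : (1 + ((k + 1 : Nat) : Int) - 1) = ((k : Nat) : Int) + 1 := by push_cast; ring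
        have h4 : (1 + (k : Int) - 1) = ((k : Nat) : Int) := by ring
        rw [h3, h4, PySem.List.pyGet?_cons_succ]
      rw [e1, e2]
    by_cases hab : a = b
    · have hcond : ¬ (some b ≠ some a) := by simp [hab]
      rw [if_neg hcond, PySem.List.foldl_congr_mem _ _ _ _ hstep, ih b]
      have : sw (a :: b :: t') = sw (b :: t') := by simp [sw, hab]
      rw [this]
    · have hcond : (some b ≠ some a) := by
        simp only [ne_eq, Option.some.injEq]
        exact fun h => hab h.symm
      rw [if_pos hcond, PySem.List.foldl_congr_mem _ _ _ _ hstep, ih b]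
      have : sw (a :: b :: t') = 1 + sw (b :: t') := by simp [sw, hab]
      rw [this]
      ring

-- ===== VERDICT (by name: the statement is the Claim_ definition above) =====
theorem number_deletions_spec : Claim_equal_number_deletions := by
  intro ab _
  unfold Spec_number_deletions
  simp only [number_deletions, number_deletions_alt]
  rw [sumRunsB_eq, List.drop_zero]
  rcases hs : ab.toList with _ | ⟨a, _ | ⟨b, t⟩⟩
  · rw [PySem.Str.len_eq, hs]
    norm_num [swd]
  · rw [PySem.Str.len_eq, hs]
    norm_num [swd, sw]
  · rw [PySem.Str.len_eq, hs]
    have hnot : ¬ (((a :: b :: t).length : Int) ≤ 1) := by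
      simp only [List.length_cons]; push_cast; omega
    rw [if_neg hnot]
    have hrange : PySem.List.pyRange 1 ((a :: b :: t).length : Int) 1
        = (List.range (b :: t).length).map (fun (k : Nat) => (1 : Int) + (k : Int)) := by
      rw [PySem.List.pyRange_one]
      have h2 : (((a :: b :: t).length : Int) - 1).toNat = (b :: t).length := by
        simp only [List.length_cons]; omega
      rw [h2]
    rw [hrange]
    simp only [List.foldl_map]
    rw [foldA_eq_sw (b :: t) a 0]
    rw [swd, if_neg (List.cons_ne_nil a (b :: t))]
    ring
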